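-- pv_equiv track=rewrite | github.com/MrBrantCode/unitest_baseline | mut_generate/mist_train_taco/taco_16350/solution.py | count_unique_friendly_divisors
-- ===== SOURCE A (Python) =====
-- from math import gcd
--
-- def count_unique_friendly_divisors(n, f, unfriendly_numbers):
--     # Find all divisors of the friendly number f
--     divs = []
--     for i in range(1, int(f ** 0.5) + 1):
--         if f % i == 0:
--             divs.append(i)
--             if i != f // i:
--                 divs.append(f // i)
--
--     # Find the unique gcds of f with each unfriendly number
--     ndivs = set()
--     for u in unfriendly_numbers:
--         ndivs.add(gcd(f, u))
--
--     # Count unique friendly divisors that are not in ndivs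
--     rt = 0
--     for d in divs:
--         for nd in ndivs:
--             if nd % d == 0:
--                 break
--         else:
--             rt += 1
--
--     return rt
-- ===== SOURCE B (Python) =====
-- def count_unique_friendly_divisors(n, f, unfriendly_numbers):
--     # Single fused pass over i = 1..isqrt(f): a divisor d of f divides some
--     # gcd(f, u) iff it divides some u directly, so no gcd set is ever built.
--     cnt = 0
--     i = 1
--     while i * i <= f:
--         if f % i == 0:
--             if all(u % i != 0 for u in unfriendly_numbers):
--                 cnt += 1
--             j = f // i
--             if j != i and all(u % j != 0 for u in unfriendly_numbers):
--                 cnt += 1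
--         i += 1
--     return cnt
-- ===== Notes on version B (the rewrite author's own statement) =====
-- stated objective: simpler
-- what changed: B drops A's divisor list and gcd set entirely: one fused sqrt-loop counts each divisor pair directly, testing a divisor d by 'no unfriendly number is divisible by d' (for d | f, d | gcd(f,u) iff d | u).
import Mathlib
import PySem

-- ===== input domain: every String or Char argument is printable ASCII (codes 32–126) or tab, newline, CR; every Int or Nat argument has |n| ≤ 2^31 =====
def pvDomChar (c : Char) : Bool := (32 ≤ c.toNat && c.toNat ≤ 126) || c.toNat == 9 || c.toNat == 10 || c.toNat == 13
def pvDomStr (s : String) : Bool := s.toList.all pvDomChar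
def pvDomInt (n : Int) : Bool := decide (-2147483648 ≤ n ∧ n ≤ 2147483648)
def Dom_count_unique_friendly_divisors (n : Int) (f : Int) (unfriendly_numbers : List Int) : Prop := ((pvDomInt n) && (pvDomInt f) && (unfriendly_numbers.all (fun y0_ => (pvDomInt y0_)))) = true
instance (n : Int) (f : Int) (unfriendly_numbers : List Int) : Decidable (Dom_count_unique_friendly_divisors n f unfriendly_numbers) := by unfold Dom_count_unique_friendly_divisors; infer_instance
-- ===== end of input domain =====

-- B replaces A's divisor list + gcd set by one fused sqrt-loop that tests each divisor d
-- directly against the unfriendly numbers (simpler, no extra data structures); return-value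
-- equivalence only (neither program mutates its arguments).

-- ===== PORT A =====
def count_unique_friendly_divisors (n : Int) (f : Int) (unfriendly_numbers : List Int) : Int :=
  -- int(f ** 0.5) is ported by hand as Nat.sqrt f.toNat: exact for 0 ≤ f ≤ 2^31 (Pre_/Dom)
  let divs : List Int := (PySem.List.pyRange 1 (((Nat.sqrt f.toNat : Nat) : Int) + 1) 1).foldl
    (fun acc i =>
      if PySem.Int.mod f i = 0 then
        let acc := acc ++ [i]
        if i ≠ PySem.Int.floordiv f i then acc ++ [PySem.Int.floordiv f i] else acc
      else acc) []
  -- math.gcd(f, u) = ((Int.gcd f u : Nat) : Int)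
  let ndivs : PySem.Set Int :=
    unfriendly_numbers.foldl (fun s u => PySem.Set.add s ((Int.gcd f u : Nat) : Int)) PySem.Set.empty
  -- the inner 'for nd in ndivs: if nd % d == 0: break / else: rt += 1' depends only on
  -- existence of such nd, never on the set's iteration order, so it is exact as .any
  divs.foldl (fun rt d => if ndivs.any (fun nd => PySem.Int.mod nd d == 0) then rt else rt + 1) 0

-- ===== PORT B =====
-- the while-loop of Source B, made total by fuel (the loop runs at most isqrt(f) + 1 ≤ f.toNat + 1 times)
def pvAltStep (f : Int) (us : List Int) (i cnt : Int) : Int :=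
  if PySem.Int.mod f i = 0 then
    let cnt := if us.all (fun u => PySem.Int.mod u i != 0) then cnt + 1 else cnt
    let j := PySem.Int.floordiv f i
    if j ≠ i ∧ us.all (fun u => PySem.Int.mod u j != 0) then cnt + 1 else cnt
  else cnt

def pvAltLoop (f : Int) (us : List Int) : Nat → Int → Int → Int
  | 0, _, cnt => cnt
  | fuel + 1, i, cnt =>
    if i * i ≤ f then pvAltLoop f us fuel (i + 1) (pvAltStep f us i cnt) else cnt

def count_unique_friendly_divisors_alt (n : Int) (f : Int) (unfriendly_numbers : List Int) : Int :=
  pvAltLoop f unfriendly_numbers (f.toNat + 1) 1 0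

-- ===== PRECONDITION & SPEC =====
-- Pre_ excludes f < 0, where Python A raises TypeError (int() applied to the complex value f ** 0.5)
def Pre_count_unique_friendly_divisors (n : Int) (f : Int) (unfriendly_numbers : List Int) : Prop := 0 ≤ f
instance (n : Int) (f : Int) (unfriendly_numbers : List Int) : Decidable (Pre_count_unique_friendly_divisors n f unfriendly_numbers) := by unfold Pre_count_unique_friendly_divisors; infer_instance
def pvWitness_count_unique_friendly_divisors : Int × Int × List Int := (0, 12, [8, -3])

def Spec_count_unique_friendly_divisors (n : Int) (f : Int) (unfriendly_numbers : List Int) (out : Int) : Prop := out = count_unique_friendly_divisors_alt n f unfriendly_numbers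
instance (n : Int) (f : Int) (unfriendly_numbers : List Int) (out : Int) : Decidable (Spec_count_unique_friendly_divisors n f unfriendly_numbers out) := by unfold Spec_count_unique_friendly_divisors; infer_instance

-- ===== CLAIM (what is proved, stated in full; the proofs are below) =====
def Claim_equal_count_unique_friendly_divisors : Prop := ∀ (n : Int) (f : Int) (unfriendly_numbers : List Int), Dom_count_unique_friendly_divisors n f unfriendly_numbers → Pre_count_unique_friendly_divisors n f unfriendly_numbers → Spec_count_unique_friendly_divisors n f unfriendly_numbers (count_unique_friendly_divisors n f unfriendly_numbers)

-- ===== LEMMAS AND PROOFS =====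

-- the per-i contribution both loops add for a loop index i
def pvContrib (f : Int) (us : List Int) (i : Int) : Int :=
  if PySem.Int.mod f i = 0 then
    (if us.all (fun u => PySem.Int.mod u i != 0) then (1 : Int) else 0) +
    (if PySem.Int.floordiv f i ≠ i ∧ us.all (fun u => PySem.Int.mod u (PySem.Int.floordiv f i) != 0) then (1 : Int) else 0)
  else 0

-- the per-i slice of A's divisor list
def pvBlock (f : Int) (i : Int) : List Int :=
  if PySem.Int.mod f i = 0 then
    [i] ++ (if i ≠ PySem.Int.floordiv f i then [PySem.Int.floordiv f i] else [])
  else []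

theorem pv_sq_le_iff (f i : Int) (hf : 0 ≤ f) (hi : 1 ≤ i) :
    i * i ≤ f ↔ i ≤ (Nat.sqrt f.toNat : Int) := by
  have hmul : i * i = ((i.toNat * i.toNat : Nat) : Int) := by
    rw [Nat.cast_mul, Int.toNat_of_nonneg (by omega : (0:Int) ≤ i)]
  constructor
  · intro h
    have := Nat.le_sqrt.mpr (show i.toNat * i.toNat ≤ f.toNat by omega)
    omega
  · intro h
    have := Nat.le_sqrt.mp (show i.toNat ≤ Nat.sqrt f.toNat by omega)
    omega

theorem pvAltStep_eq (f : Int) (us : List Int) (i cnt : Int) :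
    pvAltStep f us i cnt = cnt + pvContrib f us i := by
  simp only [pvAltStep, pvContrib]
  split_ifs <;> ring

theorem pvAltLoop_eq (f : Int) (us : List Int) :
    ∀ (fuel : Nat) (i cnt : Int), 0 ≤ f → 1 ≤ i → ((Nat.sqrt f.toNat : Int) + 1 - i).toNat ≤ fuel →
      pvAltLoop f us fuel i cnt =
        cnt + ((PySem.List.pyRange i ((Nat.sqrt f.toNat : Int) + 1) 1).map (pvContrib f us)).sum := by
  intro fuel
  induction fuel with
  | zero =>
    intro i cnt hf hi hfuel
    rw [PySem.List.pyRange_one_eq_nil (by omega)]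
    simp [pvAltLoop]
  | succ fuel ih =>
    intro i cnt hf hi hfuel
    by_cases h : i * i ≤ f
    · have hiS : i ≤ (Nat.sqrt f.toNat : Int) := (pv_sq_le_iff f i hf hi).mp h
      rw [PySem.List.pyRange_one_cons (by omega)]
      simp only [List.map_cons, List.sum_cons]
      unfold pvAltLoop
      rw [if_pos h, ih (i+1) _ hf (by omega) (by omega), pvAltStep_eq]
      ring
    · have hgt : ¬ i ≤ (Nat.sqrt f.toNat : Int) := fun hle => h ((pv_sq_le_iff f i hf hi).mpr hle)
      rw [PySem.List.pyRange_one_eq_nil (by omega)]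
      unfold pvAltLoop
      rw [if_neg h]
      simp

theorem pv_covered_iff (f d : Int) (us : List Int) (hd : d ∣ f) (hdpos : 0 < d) :
    ((us.foldl (fun s u => PySem.Set.add s ((Int.gcd f u : Nat) : Int)) PySem.Set.empty).any
        (fun nd => PySem.Int.mod nd d == 0) = true)
      ↔ ∃ u ∈ us, d ∣ u := by
  rw [List.any_eq_true]
  constructor
  · rintro ⟨nd, hmem, hnd⟩
    rw [beq_iff_eq, PySem.Int.mod_eq_zero_iff_dvd] at hnd
    rcases (PySem.Set.mem_foldl_add _ _ _ _).mp hmem with hc | ⟨u, hu, rfl⟩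
    · simp [PySem.Set.empty] at hc
    · exact ⟨u, hu, hnd.trans (Int.gcd_dvd_right f u)⟩
  · rintro ⟨u, hu, hdu⟩
    refine ⟨((Int.gcd f u : Nat) : Int), (PySem.Set.mem_foldl_add _ _ _ _).mpr (Or.inr ⟨u, hu, rfl⟩), ?_⟩
    rw [beq_iff_eq, PySem.Int.mod_eq_zero_iff_dvd]
    exact Int.dvd_coe_gcd hd hdu

-- (if covered then 0 else 1) for a positive divisor d of f equals B's direct test
theorem pv_term_eq (f d : Int) (us : List Int) (hdf : d ∣ f) (hdp : 0 < d) :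
    (if (us.foldl (fun s u => PySem.Set.add s ((Int.gcd f u : Nat) : Int)) PySem.Set.empty).any
          (fun nd => PySem.Int.mod nd d == 0) then (0:Int) else 1)
      = (if us.all (fun u => PySem.Int.mod u d != 0) then (1:Int) else 0) := by
  have hcov := pv_covered_iff f d us hdf hdp
  by_cases hall : us.all (fun u => PySem.Int.mod u d != 0) = true
  · have hc : ((us.foldl (fun s u => PySem.Set.add s ((Int.gcd f u : Nat) : Int)) PySem.Set.empty).any
          (fun nd => PySem.Int.mod nd d == 0)) = false := by
      apply Bool.eq_false_iff.mpr
      intro hct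
      obtain ⟨u, hu, hdu⟩ := hcov.mp hct
      have h2 := List.all_eq_true.mp hall u hu
      rw [bne_iff_ne, Ne, PySem.Int.mod_eq_zero_iff_dvd] at h2
      exact h2 hdu
    rw [hc, if_neg (by simp), if_pos hall]
  · have hall' : us.all (fun u => PySem.Int.mod u d != 0) = false := by
      revert hall; cases us.all (fun u => PySem.Int.mod u d != 0) <;> simp
    obtain ⟨u, hu, hpu⟩ := List.all_eq_false.mp hall'
    rw [bne_iff_ne, not_not, PySem.Int.mod_eq_zero_iff_dvd] at hpu
    rw [if_pos (hcov.mpr ⟨u, hu, hpu⟩), if_neg (by simp [hall'])]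

theorem pv_sum_map_flatMap (g : Int → Int) (b : Int → List Int) : ∀ l : List Int,
    ((l.flatMap b).map g).sum = (l.map (fun i => ((b i).map g).sum)).sum := by
  intro l
  induction l with
  | nil => simp
  | cons x t ih => simp [List.flatMap_cons, ih]

theorem pv_divs_eq (f : Int) (l : List Int) :
    l.foldl (fun acc i =>
        if PySem.Int.mod f i = 0 then
          if i ≠ PySem.Int.floordiv f i then acc ++ [i] ++ [PySem.Int.floordiv f i] else acc ++ [i]
        else acc) []
      = l.flatMap (pvBlock f) := by
  refine (PySem.List.foldl_congr_mem l _ (fun acc i => acc ++ pvBlock f i) []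
      (by intro acc x _; simp only [pvBlock]; split_ifs <;> simp)).trans ?_
  rw [PySem.List.foldl_append_eq_flatMap]
  simp

theorem pv_count_eq (c : Int → Bool) (l : List Int) :
    l.foldl (fun rt d => if c d then rt else rt + 1) 0
      = (l.map (fun d => if c d then (0:Int) else 1)).sum := by
  refine (PySem.List.foldl_congr_mem l _ (fun rt d => rt + (if c d then (0:Int) else 1)) 0
      (by intro acc x _; by_cases h : c x = true <;> simp [h])).trans ?_
  rw [PySem.List.foldl_add]
  simp

theorem portA_eq (n f : Int) (us : List Int) (hf : 0 ≤ f) :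
    count_unique_friendly_divisors n f us =
      ((PySem.List.pyRange 1 ((Nat.sqrt f.toNat : Int) + 1) 1).map (pvContrib f us)).sum := by
  simp only [count_unique_friendly_divisors]
  rw [pv_divs_eq]
  rw [pv_count_eq (fun d => (us.foldl (fun s u => PySem.Set.add s ((Int.gcd f u : Nat) : Int)) PySem.Set.empty).any
        (fun nd => PySem.Int.mod nd d == 0))]
  rw [pv_sum_map_flatMap]
  apply congrArg List.sum
  apply List.map_congr_left
  intro i hi
  rw [PySem.List.mem_pyRange_one] at hi
  obtain ⟨hi1, hi2⟩ := hi
  by_cases hmod : PySem.Int.mod f i = 0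
  · have hdvd : i ∣ f := (PySem.Int.mod_eq_zero_iff_dvd f i).mp hmod
    have hipos : 0 < i := by omega
    have hii : i * i ≤ f := (pv_sq_le_iff f i hf hi1).mpr (by omega)
    have hjdef : PySem.Int.floordiv f i = f / i := PySem.Int.floordiv_eq_ediv_of_pos (by omega)
    have hjpos : 0 < PySem.Int.floordiv f i := by
      rw [hjdef]
      have : (1:Int) ≤ f / i := Int.le_ediv_iff_mul_le hipos |>.mpr (by nlinarith)
      omega
    have hjdvd : PySem.Int.floordiv f i ∣ f := by
      obtain ⟨k, hk⟩ := hdvd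
      rw [hjdef, hk, Int.mul_ediv_cancel_left _ (by omega : i ≠ 0)]
      exact ⟨i, by ring⟩
    simp only [pvBlock, pvContrib, if_pos hmod]
    by_cases hij : i = PySem.Int.floordiv f i
    · rw [if_neg (show ¬ i ≠ PySem.Int.floordiv f i from fun h => h hij)]
      simp only [List.append_nil, List.map_cons, List.map_nil, List.sum_cons, List.sum_nil]
      rw [pv_term_eq f i us hdvd hipos,
          if_neg (show ¬ (PySem.Int.floordiv f i ≠ i ∧
              (us.all fun u => PySem.Int.mod u (PySem.Int.floordiv f i) != 0) = true)
            from fun h => h.1 hij.symm)]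
    · rw [if_pos (show i ≠ PySem.Int.floordiv f i from hij)]
      simp only [List.cons_append, List.nil_append, List.map_cons, List.map_nil,
        List.sum_cons, List.sum_nil]
      rw [pv_term_eq f i us hdvd hipos,
          pv_term_eq f (PySem.Int.floordiv f i) us hjdvd hjpos]
      congr 1
      by_cases hP : (us.all fun u => PySem.Int.mod u (PySem.Int.floordiv f i) != 0) = true
      · rw [if_pos hP, if_pos (⟨Ne.symm hij, hP⟩ : _ ∧ _)]; ring
      · rw [if_neg hP, if_neg fun hcon => hP hcon.2]; ring
  · simp [pvBlock, pvContrib, hmod]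

-- ===== VERDICT (by name: the statement is the Claim_ definition above) =====
theorem count_unique_friendly_divisors_spec : Claim_equal_count_unique_friendly_divisors := by
  intro n f us _ hpre
  unfold Spec_count_unique_friendly_divisors count_unique_friendly_divisors_alt
  have hpre' : (0:Int) ≤ f := hpre
  have hs := Nat.sqrt_le_self f.toNat
  rw [portA_eq n f us hpre',
      pvAltLoop_eq f us (f.toNat + 1) 1 0 hpre' (by omega) (by omega)]
  ring
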